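-- pv_equiv track=rewrite | github.com/salatiel6/setlist-generator | src/controllers/setlist_gen.py | merge_setlists
-- ===== SOURCE A (Python) =====
-- def merge_setlists(
--         current_album_setlist, previous_albums_setlist, acoustic_setlist):
--     setlist = [
--         val for pair in zip(
--             current_album_setlist, previous_albums_setlist)
--         for val in pair] + \
--             current_album_setlist[len(previous_albums_setlist):] + \
--             previous_albums_setlist[len(current_album_setlist):]
--
--     middle_index = len(setlist) // 2
--     setlist[middle_index:middle_index] = acoustic_setlist
--
--     return setlist
-- ===== SOURCE B (Python) =====
-- def merge_setlists(
--         current_album_setlist, previous_albums_setlist, acoustic_setlist):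
--     # Closed-form position mapping: no zip, no slicing, no interleaving loop.
--     # Output slot k of the merged (pre-acoustic) sequence is computed directly
--     # by index arithmetic, and the acoustic songs are placed while building.
--     lc = len(current_album_setlist)
--     lp = len(previous_albums_setlist)
--     m = min(lc, lp)
--
--     def song(k):
--         if k < 2 * m:
--             if k % 2 == 0:
--                 return current_album_setlist[k // 2]
--             return previous_albums_setlist[k // 2]
--         if lc > lp:
--             return current_album_setlist[k - m]
--         return previous_albums_setlist[k - m]
--
--     n = lc + lp
--     half = n // 2
--     return ([song(k) for k in range(half)]
--             + list(acoustic_setlist)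
--             + [song(k) for k in range(half, n)])
-- ===== Notes on version B (the rewrite author's own statement) =====
-- stated objective: alternative
-- what changed: Instead of materialising an interleaved list (zip comprehension plus two tail slices) and splicing the acoustic songs into it, B computes each output slot directly by a closed-form index mapping song(k) and assembles the three final segments (first half, acoustic, second half) in one expression without ever building the intermediate merged list.
import Mathlib
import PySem

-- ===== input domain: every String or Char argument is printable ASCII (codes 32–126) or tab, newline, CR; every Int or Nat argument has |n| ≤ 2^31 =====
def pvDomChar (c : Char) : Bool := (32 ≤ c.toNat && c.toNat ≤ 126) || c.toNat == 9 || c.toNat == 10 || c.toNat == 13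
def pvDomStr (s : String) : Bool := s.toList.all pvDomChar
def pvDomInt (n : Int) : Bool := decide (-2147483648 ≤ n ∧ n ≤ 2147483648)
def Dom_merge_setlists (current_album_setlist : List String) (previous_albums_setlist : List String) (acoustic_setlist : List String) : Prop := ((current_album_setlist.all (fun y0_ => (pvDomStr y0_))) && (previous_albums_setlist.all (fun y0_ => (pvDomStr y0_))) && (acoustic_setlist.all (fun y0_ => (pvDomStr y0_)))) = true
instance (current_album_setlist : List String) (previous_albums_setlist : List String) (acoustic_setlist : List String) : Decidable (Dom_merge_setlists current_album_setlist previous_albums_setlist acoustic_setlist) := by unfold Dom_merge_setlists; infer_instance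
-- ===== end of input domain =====

-- B computes every output slot by a closed-form index mapping song(k) and assembles the three
-- final segments directly, never building A's intermediate interleaved list (objective: alternative).

-- ===== PORT A =====
def merge_setlists (current_album_setlist : List String) (previous_albums_setlist : List String) (acoustic_setlist : List String) : List String :=
  let setlist :=
    ((current_album_setlist.zip previous_albums_setlist).flatMap (fun pair => [pair.1, pair.2]))
      ++ PySem.List.slice current_album_setlist (some (previous_albums_setlist.length : Int)) none
      ++ PySem.List.slice previous_albums_setlist (some (current_album_setlist.length : Int)) none
  let middle_index := PySem.Int.floordiv (setlist.length : Int) 2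
  -- slice assignment setlist[m:m] = acoustic inserts acoustic at index m; exact as take/drop since 0 ≤ m ≤ len
  setlist.take middle_index.toNat ++ acoustic_setlist ++ setlist.drop middle_index.toNat

-- ===== PORT B =====
-- B's helper song(k); list indexing is in range at every call B makes, so getD is exact
def pySong (c p : List String) (k : Nat) : String :=
  let m := min c.length p.length
  if k < 2 * m then
    if k % 2 == 0 then c.getD (k / 2) "" else p.getD (k / 2) ""
  else if p.length < c.length then c.getD (k - m) "" else p.getD (k - m) ""

def merge_setlists_alt (current_album_setlist : List String) (previous_albums_setlist : List String) (acoustic_setlist : List String) : List String :=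
  let n := current_album_setlist.length + previous_albums_setlist.length
  let half := n / 2
  (List.range half).map (pySong current_album_setlist previous_albums_setlist)
    ++ acoustic_setlist
    ++ (List.range' half (n - half)).map (pySong current_album_setlist previous_albums_setlist)

-- ===== PRECONDITION & SPEC =====
def Spec_merge_setlists (current_album_setlist : List String) (previous_albums_setlist : List String) (acoustic_setlist : List String) (out : List String) : Prop := out = merge_setlists_alt current_album_setlist previous_albums_setlist acoustic_setlist
instance (current_album_setlist : List String) (previous_albums_setlist : List String) (acoustic_setlist : List String) (out : List String) : Decidable (Spec_merge_setlists current_album_setlist previous_albums_setlist acoustic_setlist out) := by unfold Spec_merge_setlists; infer_instance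

-- ===== CLAIM (what is proved, stated in full; the proofs are below) =====
def Claim_equal_merge_setlists : Prop := ∀ (current_album_setlist : List String) (previous_albums_setlist : List String) (acoustic_setlist : List String), Dom_merge_setlists current_album_setlist previous_albums_setlist acoustic_setlist → Spec_merge_setlists current_album_setlist previous_albums_setlist acoustic_setlist (merge_setlists current_album_setlist previous_albums_setlist acoustic_setlist)

-- ===== LEMMAS AND PROOFS =====
-- proof-only helper: the interleaving A's merged list equals
def pyInterleave : List String → List String → List String
  | [], ys => ys
  | xs, [] => xs
  | x :: xs, y :: ys => x :: y :: pyInterleave xs ys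

theorem interleave_eq (c p : List String) :
    ((c.zip p).flatMap (fun pair => [pair.1, pair.2])) ++ c.drop p.length ++ p.drop c.length
      = pyInterleave c p := by
  induction c generalizing p with
  | nil => cases p <;> simp [pyInterleave]
  | cons x xs ih =>
    cases p with
    | nil => simp [pyInterleave]
    | cons y ys => simpa [pyInterleave] using ih ys

theorem interleave_length (c p : List String) :
    (pyInterleave c p).length = c.length + p.length := by
  induction c generalizing p with
  | nil => cases p <;> simp [pyInterleave]
  | cons x xs ih =>
    cases p with
    | nil => simp [pyInterleave]
    | cons y ys => simp [pyInterleave, ih ys]; omega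

theorem pySong_cons (x y : String) (xs ys : List String) (k : Nat) :
    pySong (x :: xs) (y :: ys) (k + 2) = pySong xs ys k := by
  unfold pySong
  simp only [List.length_cons]
  have hm : min (xs.length + 1) (ys.length + 1) = min xs.length ys.length + 1 := by omega
  rw [hm]
  by_cases hlt : k < 2 * min xs.length ys.length
  · rw [if_pos (by omega : k + 2 < 2 * (min xs.length ys.length + 1)), if_pos hlt]
    have h2 : (k + 2) / 2 = k / 2 + 1 := by omega
    have h3 : (k + 2) % 2 = k % 2 := by omega
    rw [h3, h2]
    by_cases he : k % 2 = 0 <;> simp [he]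
  · rw [if_neg (by omega : ¬ k + 2 < 2 * (min xs.length ys.length + 1)), if_neg hlt]
    have h4 : k + 2 - (min xs.length ys.length + 1) = k - min xs.length ys.length + 1 := by omega
    rw [h4]
    by_cases hc : ys.length < xs.length <;> simp [hc]

theorem interleave_getD (c p : List String) (k : Nat) (hk : k < c.length + p.length) :
    (pyInterleave c p).getD k "" = pySong c p k := by
  induction c generalizing p k with
  | nil =>
    cases p with
    | nil => simp at hk
    | cons y ys => simp [pyInterleave, pySong]
  | cons x xs ih =>
    cases p with
    | nil => simp [pyInterleave, pySong]
    | cons y ys =>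
      match k with
      | 0 =>
        unfold pySong
        rw [if_pos (show 0 < 2 * min (x :: xs).length (y :: ys).length by simp only [List.length_cons]; omega)]
        simp [pyInterleave]
      | 1 =>
        unfold pySong
        rw [if_pos (show 1 < 2 * min (x :: xs).length (y :: ys).length by simp only [List.length_cons]; omega)]
        simp [pyInterleave]
      | (k' + 2) =>
        have hk' : k' < xs.length + ys.length := by simp at hk; omega
        simp only [pyInterleave, List.getD_cons_succ]
        rw [pySong_cons]
        exact ih ys k' hk'

theorem interleave_eq_map_song (c p : List String) :
    pyInterleave c p = (List.range (c.length + p.length)).map (pySong c p) := by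
  apply List.ext_getElem
  · simp [interleave_length]
  · intro i h1 h2
    have hi : i < c.length + p.length := by simpa [interleave_length] using h1
    have := interleave_getD c p i hi
    simpa [List.getD_eq_getElem?_getD, List.getElem?_eq_getElem h1,
      List.getElem?_eq_getElem h2] using this

-- ===== VERDICT (by name: the statement is the Claim_ definition above) =====
theorem merge_setlists_spec : Claim_equal_merge_setlists := by
  intro c p a _
  unfold Spec_merge_setlists merge_setlists merge_setlists_alt
  simp only [PySem.List.slice_from_natCast, interleave_eq, interleave_length]
  rw [show (2 : Int) = ((2 : Nat) : Int) from by norm_num]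
  simp only [PySem.Int.floordiv_natCast, Int.toNat_natCast]
  rw [interleave_eq_map_song]
  congr 1
  · rw [← List.map_take, List.take_range, Nat.min_eq_left (Nat.div_le_self _ _)]
  · rw [← List.map_drop, List.range_eq_range', List.drop_range']
    norm_num
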